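-- pv_equiv track=rewrite | github.com/woweizhi/CBB-520-assignment3 | src/srcGroup6/replaceaa.py | replace_amino
-- ===== SOURCE A (Python) =====
-- def replace_amino(protein_sequence: str) -> tuple[str, dict[str, int]]:
--     """
--     Replaces specific amino acids in a protein sequence with new labels
--     and returns the modified sequence along with a dictionary of replacement counts.
--
--     Replacements:
--         - Valine, Leucine, Isoleucine, Alanine, Methionine -> B
--         - Phenylalanine, Tryptophan, Tyrosine -> J
--         - Aspartic Acid, Glutamic Acid -> O
--         - Arginine, Histidine, Lysine -> U
--         - Asparagine, Cysteine, Glutamine, Serine, Threonine -> Z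
--
--     Args:
--         protein_sequence: string representing a sequence of amino acids
--
--     Returns:
--         tuple: (modified sequence, dict of replacement counts)
--     """
--
--     # Define the mappings for amino acids
--     replacements = {
--         'B': ['V', 'L', 'I', 'A', 'M'],  # Valine, Leucine, Isoleucine, Alanine, Methionine
--         'J': ['F', 'W', 'Y'],            # Phenylalanine, Tryptophan, Tyrosine
--         'O': ['D', 'E'],                 # Aspartic Acid, Glutamic Acid
--         'U': ['R', 'H', 'K'],            # Arginine, Histidine, Lysine
--         'Z': ['N', 'C', 'Q', 'S', 'T'],  # Asparagine, Cysteine, Glutamine, Serine, Threonine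
--     }
--
--     # Create a dictionary to track the count of each replacement
--     replacement_counts = {'B': 0, 'J': 0, 'O': 0, 'U': 0, 'Z': 0}
--
--     # Convert the protein sequence to a list for easier replacement
--     sequence_list = list(protein_sequence)
--
--     # Iterate over the sequence and apply replacements
--     for i, amino_acid in enumerate(sequence_list):
--         for replacement, amino_acids in replacements.items():
--             if amino_acid in amino_acids:
--                 sequence_list[i] = replacement
--                 replacement_counts[replacement] += 1
--
--     # Join the list back into a string
--     modified_sequence = ''.join(sequence_list)
--
--     # Return both the modified sequence and the dictionary with the count of each replacement
--     return modified_sequence, replacement_counts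
-- ===== SOURCE B (Python) =====
-- def replace_amino(protein_sequence: str) -> tuple[str, dict[str, int]]:
--     groups = {'B': 'VLIAM', 'J': 'FWY', 'O': 'DE', 'U': 'RHK', 'Z': 'NCQST'}
--     # invert the mapping once: amino-acid character -> group label
--     char_to_label = {}
--     for label, chars in groups.items():
--         for c in chars:
--             char_to_label[c] = label
--     replacement_counts = {'B': 0, 'J': 0, 'O': 0, 'U': 0, 'Z': 0}
--     out = []
--     for c in protein_sequence:
--         label = char_to_label.get(c)
--         if label is None:
--             out.append(c)
--         else:
--             out.append(label)
--             replacement_counts[label] += 1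
--     return ''.join(out), replacement_counts
-- ===== Notes on version B (the rewrite author's own statement) =====
-- stated objective: idiomatic
-- what changed: Instead of scanning all five replacement groups for every character (and mutating the list in place), B inverts the mapping once into a flat char->label dict and makes a single lookup per character while building the output list.
import Mathlib
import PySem

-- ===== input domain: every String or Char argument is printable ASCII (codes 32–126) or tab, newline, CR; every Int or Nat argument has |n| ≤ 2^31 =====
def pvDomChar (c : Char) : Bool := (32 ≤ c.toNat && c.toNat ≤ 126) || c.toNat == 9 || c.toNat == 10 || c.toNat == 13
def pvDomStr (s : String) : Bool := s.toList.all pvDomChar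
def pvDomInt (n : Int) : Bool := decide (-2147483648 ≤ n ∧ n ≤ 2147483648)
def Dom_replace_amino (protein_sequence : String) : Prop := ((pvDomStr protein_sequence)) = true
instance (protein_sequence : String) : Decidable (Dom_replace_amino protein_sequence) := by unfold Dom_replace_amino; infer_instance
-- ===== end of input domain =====

-- B replaces A's per-character scan over all five replacement groups by a flat
-- inverted char->label dictionary built once, so each character needs one lookup
-- (idiomatic/constant-factor restructuring; return values proved equal on Dom).


-- ===== PORT A =====
-- the `replacements` dict of A, in insertion order (label -> list of amino acids)
def aReplacements : List (String × List String) :=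
  [("B", ["V", "L", "I", "A", "M"]),
   ("J", ["F", "W", "Y"]),
   ("O", ["D", "E"]),
   ("U", ["R", "H", "K"]),
   ("Z", ["N", "C", "Q", "S", "T"])]

-- replacement_counts = {'B': 0, 'J': 0, 'O': 0, 'U': 0, 'Z': 0}
def aCountsInit : PySem.Dict String Int :=
  PySem.Dict.ofList [("B", 0), ("J", 0), ("O", 0), ("U", 0), ("Z", 0)]

def replace_amino (protein_sequence : String) : String × (List (String × Int)) :=
  -- sequence_list = list(protein_sequence)  (a list of 1-character strings)
  let sequenceList : List String := protein_sequence.toList.map (fun c => String.ofList [c])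
  -- for i, amino_acid in enumerate(sequence_list): for replacement, amino_acids in replacements.items(): ...
  let res :=
    (PySem.List.enumerate sequenceList 0).foldl
      (fun (st : List String × PySem.Dict String Int) p =>
        aReplacements.foldl
          (fun st2 r =>
            if p.2 ∈ r.2 then
              (PySem.List.pySetD st2.1 p.1 r.1, st2.2.modify r.1 0 (· + 1))
            else st2)
          st)
      (sequenceList, aCountsInit)
  -- return ''.join(sequence_list), replacement_counts
  (PySem.Str.join "" res.1, res.2.items)

-- ===== PORT B =====
def bGroups : List (String × String) :=
  [("B", "VLIAM"), ("J", "FWY"), ("O", "DE"), ("U", "RHK"), ("Z", "NCQST")]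

-- char_to_label: inverted index, built once by the double loop over the groups
def bCharToLabel : PySem.Dict String String :=
  bGroups.foldl (fun d g => g.2.toList.foldl (fun d c => d.insert (String.ofList [c]) g.1) d)
    PySem.Dict.empty

def bCountsInit : PySem.Dict String Int :=
  PySem.Dict.ofList [("B", 0), ("J", 0), ("O", 0), ("U", 0), ("Z", 0)]

def replace_amino_alt (protein_sequence : String) : String × (List (String × Int)) :=
  -- single pass: label = char_to_label.get(c); append and count
  let res :=
    protein_sequence.toList.foldl
      (fun (st : List String × PySem.Dict String Int) c =>
        match bCharToLabel.get? (String.ofList [c]) with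
        | none => (st.1 ++ [String.ofList [c]], st.2)
        | some lab => (st.1 ++ [lab], st.2.modify lab 0 (· + 1)))
      ([], bCountsInit)
  (PySem.Str.join "" res.1, res.2.items)

-- ===== PRECONDITION & SPEC =====
def Spec_replace_amino (protein_sequence : String) (out : String × (List (String × Int))) : Prop := out = replace_amino_alt protein_sequence
instance (protein_sequence : String) (out : String × (List (String × Int))) : Decidable (Spec_replace_amino protein_sequence out) := by unfold Spec_replace_amino; infer_instance

-- ===== CLAIM (what is proved, stated in full; the proofs are below) =====
def Claim_equal_replace_amino : Prop := ∀ (protein_sequence : String), Dom_replace_amino protein_sequence → Spec_replace_amino protein_sequence (replace_amino protein_sequence)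

-- ===== LEMMAS AND PROOFS =====

-- the 18 amino-acid characters that get replaced (as 1-character strings)
def allAA : List String :=
  ["V", "L", "I", "A", "M", "F", "W", "Y", "D", "E", "R", "H", "K", "N", "C", "Q", "S", "T"]

-- per-character result: the label B's inverted index assigns, or the char itself
def transS (x : String) : String := (bCharToLabel.get? x).getD x

-- per-character counts update, shared shape of both loops
def dstep (d : PySem.Dict String Int) (x : String) : PySem.Dict String Int :=
  match bCharToLabel.get? x with
  | none => d
  | some lab => d.modify lab 0 (· + 1)

-- B's inverted index, evaluated to its literal insert chain
lemma bCharToLabel_eq :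
    bCharToLabel =
      ((((((((((((((((((PySem.Dict.empty.insert "V" "B").insert "L" "B").insert "I" "B").insert
        "A" "B").insert "M" "B").insert "F" "J").insert "W" "J").insert "Y" "J").insert
        "D" "O").insert "E" "O").insert "R" "U").insert "H" "U").insert "K" "U").insert
        "N" "Z").insert "C" "Z").insert "Q" "Z").insert "S" "Z").insert "T" "Z") := by decide

-- A's inner loop over the five groups equals one lookup in B's inverted index
lemma innerA_eq (i : Int) (x : String) (st : List String × PySem.Dict String Int) :
    aReplacements.foldl
      (fun st2 r =>
        if x ∈ r.2 then (PySem.List.pySetD st2.1 i r.1, st2.2.modify r.1 0 (· + 1)) else st2)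
      st
    = (match bCharToLabel.get? x with
       | none => st
       | some lab => (PySem.List.pySetD st.1 i lab, st.2.modify lab 0 (· + 1))) := by
  by_cases hx : x ∈ allAA
  · simp only [allAA, List.mem_cons, List.not_mem_nil, or_false] at hx
    rcases hx with rfl | rfl | rfl | rfl | rfl | rfl | rfl | rfl | rfl | rfl | rfl | rfl | rfl | rfl | rfl | rfl | rfl | rfl <;>
      simp [aReplacements, bCharToLabel_eq, PySem.Dict.get?_insert]
  · simp only [allAA, List.mem_cons, List.not_mem_nil, or_false, not_or] at hx
    obtain ⟨h1, h2, h3, h4, h5, h6, h7, h8, h9, h10, h11, h12, h13, h14, h15, h16, h17, h18⟩ := hx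
    simp [aReplacements, bCharToLabel_eq,
      h1, h2, h3, h4, h5, h6, h7, h8, h9, h10, h11, h12, h13, h14, h15, h16, h17, h18,
      PySem.Dict.get?_insert, PySem.Dict.get?_empty]

-- B's per-character step in terms of transS / dstep
lemma stepB_eq (st : List String × PySem.Dict String Int) (c : Char) :
    (match bCharToLabel.get? (String.ofList [c]) with
     | none => (st.1 ++ [String.ofList [c]], st.2)
     | some lab => (st.1 ++ [lab], st.2.modify lab 0 (· + 1)))
    = (st.1 ++ [transS (String.ofList [c])], dstep st.2 (String.ofList [c])) := by
  unfold transS dstep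
  cases bCharToLabel.get? (String.ofList [c]) <;> simp

-- B's loop collects the transformed characters and folds the count updates
lemma foldB (cs : List Char) :
    ∀ (acc : List String) (d : PySem.Dict String Int),
      cs.foldl
        (fun (st : List String × PySem.Dict String Int) c =>
          match bCharToLabel.get? (String.ofList [c]) with
          | none => (st.1 ++ [String.ofList [c]], st.2)
          | some lab => (st.1 ++ [lab], st.2.modify lab 0 (· + 1)))
        (acc, d)
      = (acc ++ cs.map (fun c => transS (String.ofList [c])),
         (cs.map (fun c => String.ofList [c])).foldl dstep d) := by
  induction cs with
  | nil => intro acc d; simp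
  | cons c cs ih =>
    intro acc d
    simp only [List.foldl_cons]
    rw [stepB_eq (acc, d) c, ih]
    simp

-- A's loop, started anywhere: the processed prefix P stays, the rest is mapped
lemma foldA (rest : List String) :
    ∀ (P : List String) (d : PySem.Dict String Int),
      (PySem.List.enumerate rest (P.length : Int)).foldl
        (fun (st : List String × PySem.Dict String Int) p =>
          aReplacements.foldl
            (fun st2 r =>
              if p.2 ∈ r.2 then (PySem.List.pySetD st2.1 p.1 r.1, st2.2.modify r.1 0 (· + 1))
              else st2)
            st)
        (P ++ rest, d)
      = (P ++ rest.map transS, rest.foldl dstep d) := by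
  induction rest with
  | nil => intro P d; simp [PySem.List.enumerate_nil]
  | cons x rest ih =>
    intro P d
    rw [PySem.List.enumerate_cons]
    simp only [List.foldl_cons]
    rw [innerA_eq]
    have hlen : ∀ y : String, ((P.length : Int) + 1) = (((P ++ [y]).length : Nat) : Int) := by
      intro y; simp
    cases hg : bCharToLabel.get? x with
    | none =>
      have hx : transS x = x := by simp [transS, hg]
      have hd : dstep d x = d := by simp [dstep, hg]
      dsimp only
      rw [hlen x]
      have h2 := ih (P ++ [x]) d
      simp only [List.append_assoc, List.singleton_append] at h2
      rw [h2]
      simp [hx, hd]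
    | some lab =>
      dsimp only
      have hx : transS x = lab := by simp [transS, hg]
      have hd : dstep d x = d.modify lab 0 (· + 1) := by simp [dstep, hg]
      have hset : PySem.List.pySetD (P ++ x :: rest) (P.length : Int) lab = P ++ lab :: rest := by
        rw [PySem.List.pySetD_natCast]; simp
      rw [hset, hlen lab]
      have h2 := ih (P ++ [lab]) (d.modify lab 0 (· + 1))
      simp only [List.append_assoc, List.singleton_append] at h2
      rw [h2]
      simp [hx, hd]

-- ===== VERDICT (by name: the statement is the Claim_ definition above) =====
theorem replace_amino_spec : Claim_equal_replace_amino := by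
  intro ps _
  unfold Spec_replace_amino
  simp only [replace_amino, replace_amino_alt]
  have hA := foldA (ps.toList.map (fun c => String.ofList [c])) [] aCountsInit
  simp only [List.length_nil, Nat.cast_zero, List.nil_append] at hA
  rw [hA, foldB]
  have hinit : aCountsInit = bCountsInit := rfl
  simp [List.map_map, Function.comp_def, hinit]
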